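-- pv_equiv track=rewrite | github.com/Rina8475/UCB-CS61A | exams/ExamPrep_01_ans.py | get_k_run_starter
-- ===== SOURCE A (Python) =====
-- def get_k_run_starter(n, k):
--     """
--     >>> get_k_run_starter(123444345, 0) # example from description
--     3
--     >>> get_k_run_starter(123444345, 1)
--     4
--     >>> get_k_run_starter(123444345, 2)
--     4
--     >>> get_k_run_starter(123444345, 3)
--     1
--     >>> get_k_run_starter(123412341234, 1)
--     1
--     >>> get_k_run_starter(1234234534564567, 0)
--     4
--     >>> get_k_run_starter(1234234534564567, 1)
--     3
--     >>> get_k_run_starter(1234234534564567, 2)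
--     2
--     """
--     i = 0
--     final = None
--     while i <= k:
--         while n >= 10 and n % 10 > (n // 10) % 10:
--             n //= 10
--         final = n % 10
--         i = i + 1
--         n = n // 10
--     return final
-- ===== SOURCE B (Python) =====
-- def get_k_run_starter(n, k):
--     # One right-to-left pass over the digits collecting every run-starter
--     # (a digit that is <= its more significant neighbour, or the leading digit),
--     # then index into that list; k beyond the last run yields 0.
--     starters = []
--     while True:
--         d = n % 10
--         n //= 10
--         if n == 0 or d <= n % 10:
--             starters.append(d)
--         if n == 0:
--             break
--     return starters[k] if k < len(starters) else 0
-- ===== Notes on version B (the rewrite author's own statement) =====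
-- stated objective: alternative
-- what changed: A re-consumes the number with a nested strip-loop once per outer iteration (k+1 passes over the remaining digits); B makes one right-to-left pass over the digits collecting every run-starter into a list and then indexes it, returning 0 past the last run.
-- outside the precondition, e.g. on get_k_run_starter(-5, 0): A returns 5, B does not finish within the time limit; on get_k_run_starter(7, -1): A returns None, B returns 7
import Mathlib
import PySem

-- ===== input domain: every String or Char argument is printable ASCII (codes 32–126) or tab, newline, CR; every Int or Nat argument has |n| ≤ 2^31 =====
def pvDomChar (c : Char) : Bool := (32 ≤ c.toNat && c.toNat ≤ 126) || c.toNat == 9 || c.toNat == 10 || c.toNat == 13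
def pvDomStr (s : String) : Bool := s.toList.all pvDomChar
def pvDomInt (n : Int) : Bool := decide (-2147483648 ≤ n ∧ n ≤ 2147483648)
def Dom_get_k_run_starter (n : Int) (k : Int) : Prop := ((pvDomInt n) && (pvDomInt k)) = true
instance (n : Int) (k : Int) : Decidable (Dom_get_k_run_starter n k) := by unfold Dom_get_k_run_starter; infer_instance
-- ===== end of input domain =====

-- B replaces A's nested re-consuming loops by ONE right-to-left digit pass that collects all
-- run-starter digits into a list and then indexes it (objective: alternative).

-- ===== PORT A =====
-- inner while loop of A: strip digits while n >= 10 and n % 10 > (n // 10) % 10;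
-- the fuel argument only totalizes the loop (fuel n.toNat is enough: each pass divides n by 10)
def pvStrip (fuel : Nat) (n : Int) : Int :=
  match fuel with
  | 0 => n
  | f + 1 =>
    if 10 ≤ n ∧ PySem.Int.mod (PySem.Int.floordiv n 10) 10 < PySem.Int.mod n 10
    then pvStrip f (PySem.Int.floordiv n 10) else n

-- outer while loop of A: runs (k+1) times (i = 0 .. k), carrying (n, final)
def pvAOuter : Int → Nat → Int → Int
  | _, 0, final => final
  | n, fuel + 1, _ =>
    pvAOuter (PySem.Int.floordiv (pvStrip n.toNat n) 10) fuel
      (PySem.Int.mod (pvStrip n.toNat n) 10)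

-- for k < 0 the Python loop body never runs and A returns None (not an Int): excluded by Pre_
def get_k_run_starter (n : Int) (k : Int) : Int :=
  pvAOuter n ((k + 1).toNat) 0

-- ===== PORT B =====
-- the 'while True' digit loop of Source B: d = n % 10; n //= 10; append d if starter; break if n == 0.
-- The fuel argument only totalizes it (fuel n.toNat + 1 is enough on the terminating inputs n ≥ 0)
def pvBRun (fuel : Nat) (n : Int) (acc : List Int) : List Int :=
  match fuel with
  | 0 => acc
  | f + 1 =>
    if PySem.Int.floordiv n 10 = 0 then
      (if PySem.Int.floordiv n 10 = 0 ∨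
          PySem.Int.mod n 10 ≤ PySem.Int.mod (PySem.Int.floordiv n 10) 10
       then acc ++ [PySem.Int.mod n 10] else acc)
    else
      pvBRun f (PySem.Int.floordiv n 10)
        (if PySem.Int.floordiv n 10 = 0 ∨
            PySem.Int.mod n 10 ≤ PySem.Int.mod (PySem.Int.floordiv n 10) 10
         then acc ++ [PySem.Int.mod n 10] else acc)

def get_k_run_starter_alt (n : Int) (k : Int) : Int :=
  if k < PySem.List.len (pvBRun (n.toNat + 1) n []) then
    PySem.List.pyGetD (pvBRun (n.toNat + 1) n []) k 0
  else 0

-- ===== PRECONDITION & SPEC =====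
-- Pre_ excludes k < 0, where A returns None (not an Int), and n < 0, where A's returned digits
-- are an artefact of Python floor division on negatives and B's digit loop never terminates.
def Pre_get_k_run_starter (n : Int) (k : Int) : Prop := 0 ≤ n ∧ 0 ≤ k
instance (n : Int) (k : Int) : Decidable (Pre_get_k_run_starter n k) := by
  unfold Pre_get_k_run_starter; infer_instance

def pvWitness_get_k_run_starter : Int × Int := (123444345, 1)

def Spec_get_k_run_starter (n : Int) (k : Int) (out : Int) : Prop := out = get_k_run_starter_alt n k
instance (n : Int) (k : Int) (out : Int) : Decidable (Spec_get_k_run_starter n k out) := by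
  unfold Spec_get_k_run_starter; infer_instance

-- ===== CLAIM (what is proved, stated in full; the proofs are below) =====
def Claim_equal_get_k_run_starter : Prop := ∀ (n : Int) (k : Int), Dom_get_k_run_starter n k → Pre_get_k_run_starter n k → Spec_get_k_run_starter n k (get_k_run_starter n k)

-- ===== LEMMAS AND PROOFS =====

-- once the strip guard fails, any fuel leaves n unchanged
theorem pvStrip_of_neg {n : Int}
    (h : ¬ (10 ≤ n ∧ PySem.Int.mod (PySem.Int.floordiv n 10) 10 < PySem.Int.mod n 10)) :
    ∀ f, pvStrip f n = n := by
  intro f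
  cases f with
  | zero => rfl
  | succ f => rw [pvStrip, if_neg h]

theorem pvStrip_bounds : ∀ (f : Nat) {n : Int}, 0 ≤ n → 0 ≤ pvStrip f n ∧ pvStrip f n ≤ n := by
  intro f
  induction f with
  | zero => intro n h; exact ⟨h, le_rfl⟩
  | succ f ih =>
    intro n h
    rw [pvStrip]
    by_cases hc : 10 ≤ n ∧ PySem.Int.mod (PySem.Int.floordiv n 10) 10 < PySem.Int.mod n 10
    · rw [if_pos hc]
      rw [PySem.Int.floordiv_eq_ediv_of_pos (by norm_num : (0:Int) < 10)]
      have := ih (n := n / 10) (by omega)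
      omega
    · rw [if_neg hc]
      exact ⟨h, le_rfl⟩

-- the strip result does not depend on the fuel once the fuel is at least n.toNat
theorem pvStrip_stable : ∀ (N : Nat) (n : Int), n.toNat ≤ N → 0 ≤ n → ∀ f g : Nat,
    n.toNat ≤ f → n.toNat ≤ g → pvStrip f n = pvStrip g n := by
  intro N
  induction N with
  | zero =>
    intro n hN h0 f g _ _
    have hn : n = 0 := by omega
    subst hn
    rw [pvStrip_of_neg (by rintro ⟨h1, _⟩; omega), pvStrip_of_neg (by rintro ⟨h1, _⟩; omega)]
  | succ N ih =>
    intro n hN h0 f g hf hg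
    by_cases hc : 10 ≤ n ∧ PySem.Int.mod (PySem.Int.floordiv n 10) 10 < PySem.Int.mod n 10
    · have h10 : (10:Int) ≤ n := hc.1
      have hdiv : PySem.Int.floordiv n 10 = n / 10 :=
        PySem.Int.floordiv_eq_ediv_of_pos (by norm_num)
      obtain ⟨f', rfl⟩ : ∃ f', f = f' + 1 := ⟨f - 1, by omega⟩
      obtain ⟨g', rfl⟩ : ∃ g', g = g' + 1 := ⟨g - 1, by omega⟩
      rw [pvStrip, if_pos hc, pvStrip, if_pos hc]
      exact ih _ (by rw [hdiv]; omega) (by rw [hdiv]; omega) f' g'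
        (by rw [hdiv]; omega) (by rw [hdiv]; omega)
    · rw [pvStrip_of_neg hc, pvStrip_of_neg hc]

-- with fuel at least n.toNat the strip guard fails at the result (the run is fully stripped)
theorem pvStrip_fix : ∀ (f : Nat) (n : Int), 0 ≤ n → n.toNat ≤ f →
    ¬ (10 ≤ pvStrip f n ∧
        PySem.Int.mod (PySem.Int.floordiv (pvStrip f n) 10) 10 < PySem.Int.mod (pvStrip f n) 10) := by
  intro f
  induction f with
  | zero =>
    intro n h0 hf
    have hn : n = 0 := by omega
    subst hn
    decide
  | succ f ih =>
    intro n h0 hf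
    by_cases hc : 10 ≤ n ∧ PySem.Int.mod (PySem.Int.floordiv n 10) 10 < PySem.Int.mod n 10
    · rw [pvStrip, if_pos hc]
      have hdiv : PySem.Int.floordiv n 10 = n / 10 :=
        PySem.Int.floordiv_eq_ediv_of_pos (by norm_num)
      have h10 : (10:Int) ≤ n := hc.1
      exact ih _ (by rw [hdiv]; omega) (by rw [hdiv]; omega)
    · rw [pvStrip_of_neg hc]
      exact hc

-- appending to the accumulator commutes with B's loop
theorem pvBRun_acc : ∀ (f : Nat) (n : Int) (acc : List Int),
    pvBRun f n acc = acc ++ pvBRun f n [] := by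
  intro f
  induction f with
  | zero => intro n acc; simp [pvBRun]
  | succ f ih =>
    intro n acc
    rw [pvBRun, pvBRun]
    by_cases hz : PySem.Int.floordiv n 10 = 0
    · rw [if_pos hz, if_pos hz]
      split_ifs <;> simp
    · rw [if_neg hz, if_neg hz]
      rw [ih (PySem.Int.floordiv n 10)
            (if PySem.Int.floordiv n 10 = 0 ∨
                PySem.Int.mod n 10 ≤ PySem.Int.mod (PySem.Int.floordiv n 10) 10
             then acc ++ [PySem.Int.mod n 10] else acc),
          ih (PySem.Int.floordiv n 10)
            (if PySem.Int.floordiv n 10 = 0 ∨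
                PySem.Int.mod n 10 ≤ PySem.Int.mod (PySem.Int.floordiv n 10) 10
             then [] ++ [PySem.Int.mod n 10] else [])]
      split_ifs <;> simp

-- B's loop result does not depend on the fuel once the fuel exceeds n.toNat
theorem pvBRun_stable : ∀ (N : Nat) (n : Int), n.toNat ≤ N → 0 ≤ n → ∀ (f g : Nat) (acc : List Int),
    n.toNat < f → n.toNat < g → pvBRun f n acc = pvBRun g n acc := by
  intro N
  induction N with
  | zero =>
    intro n hN h0 f g acc hf hg
    have hn : n = 0 := by omega
    subst hn
    obtain ⟨f', rfl⟩ : ∃ f', f = f' + 1 := ⟨f - 1, by omega⟩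
    obtain ⟨g', rfl⟩ : ∃ g', g = g' + 1 := ⟨g - 1, by omega⟩
    have hz : PySem.Int.floordiv (0:Int) 10 = 0 := by decide
    rw [pvBRun, pvBRun, if_pos hz, if_pos hz]
  | succ N ih =>
    intro n hN h0 f g acc hf hg
    obtain ⟨f', rfl⟩ : ∃ f', f = f' + 1 := ⟨f - 1, by omega⟩
    obtain ⟨g', rfl⟩ : ∃ g', g = g' + 1 := ⟨g - 1, by omega⟩
    rw [pvBRun, pvBRun]
    by_cases hz : PySem.Int.floordiv n 10 = 0
    · rw [if_pos hz, if_pos hz]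
    · rw [if_neg hz, if_neg hz]
      have hdiv : PySem.Int.floordiv n 10 = n / 10 :=
        PySem.Int.floordiv_eq_ediv_of_pos (by norm_num)
      have h10 : (10:Int) ≤ n := by rw [hdiv] at hz; omega
      exact ih _ (by rw [hdiv]; omega) (by rw [hdiv]; omega) f' g' _
        (by rw [hdiv]; omega) (by rw [hdiv]; omega)

-- the starter list of n (n ≥ 0) is: last digit of the stripped n, then the starters of the rest
theorem pvBRun_strip : ∀ (N : Nat) (n : Int), n.toNat ≤ N → 0 ≤ n →
    pvBRun (n.toNat + 1) n [] = PySem.Int.mod (pvStrip n.toNat n) 10 ::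
      (if PySem.Int.floordiv (pvStrip n.toNat n) 10 = 0 then []
       else pvBRun ((PySem.Int.floordiv (pvStrip n.toNat n) 10).toNat + 1)
              (PySem.Int.floordiv (pvStrip n.toNat n) 10) []) := by
  intro N
  induction N with
  | zero =>
    intro n hN h0
    have hn : n = 0 := by omega
    subst hn
    decide
  | succ N ih =>
    intro n hN h0
    by_cases hc : 10 ≤ n ∧ PySem.Int.mod (PySem.Int.floordiv n 10) 10 < PySem.Int.mod n 10
    · -- non-starter digit: both sides step to n // 10
      have h10 : (10:Int) ≤ n := hc.1
      have hdiv : PySem.Int.floordiv n 10 = n / 10 :=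
        PySem.Int.floordiv_eq_ediv_of_pos (by norm_num)
      have hq0 : 0 ≤ PySem.Int.floordiv n 10 := by rw [hdiv]; omega
      have hqlt : (PySem.Int.floordiv n 10).toNat < n.toNat := by rw [hdiv]; omega
      have hmeq : pvStrip n.toNat n = pvStrip (PySem.Int.floordiv n 10).toNat
          (PySem.Int.floordiv n 10) := by
        obtain ⟨f', hf⟩ : ∃ f', n.toNat = f' + 1 := ⟨n.toNat - 1, by omega⟩
        rw [hf, pvStrip, if_pos hc]
        exact pvStrip_stable f' _ (by omega) hq0 f' _ (by omega) le_rfl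
      have hnz : ¬ PySem.Int.floordiv n 10 = 0 := by rw [hdiv]; omega
      have hnst : ¬ (PySem.Int.floordiv n 10 = 0 ∨
          PySem.Int.mod n 10 ≤ PySem.Int.mod (PySem.Int.floordiv n 10) 10) := by
        rintro (h1 | h2)
        · exact hnz h1
        · omega
      obtain ⟨f', hf⟩ : ∃ f', n.toNat = f' + 1 := ⟨n.toNat - 1, by omega⟩
      have hstep : pvBRun (n.toNat + 1) n [] =
          pvBRun (f' + 1) (PySem.Int.floordiv n 10) [] := by
        rw [hf, pvBRun, if_neg hnz, if_neg hnst]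
      rw [hstep,
          pvBRun_stable N (PySem.Int.floordiv n 10) (by omega) hq0 (f' + 1)
            ((PySem.Int.floordiv n 10).toNat + 1) [] (by omega) (by omega),
          ih _ (by omega) hq0, hmeq]
    · -- the last digit is a run starter: the stripped n is n itself
      have hm : pvStrip n.toNat n = n := pvStrip_of_neg hc n.toNat
      rw [hm]
      by_cases hz : PySem.Int.floordiv n 10 = 0
      · obtain ⟨f', hf⟩ : ∃ f', n.toNat + 1 = f' + 1 := ⟨n.toNat, rfl⟩
        rw [hf, pvBRun, if_pos hz, if_pos (Or.inl hz), if_pos hz]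
        simp
      · have hdiv : PySem.Int.floordiv n 10 = n / 10 :=
          PySem.Int.floordiv_eq_ediv_of_pos (by norm_num)
        have h10 : (10:Int) ≤ n := by rw [hdiv] at hz; omega
        have hq0 : 0 ≤ PySem.Int.floordiv n 10 := by rw [hdiv]; omega
        have hle : PySem.Int.mod n 10 ≤ PySem.Int.mod (PySem.Int.floordiv n 10) 10 := by
          by_contra hlt
          exact hc ⟨h10, by omega⟩
        have hqlt : (PySem.Int.floordiv n 10).toNat < n.toNat := by rw [hdiv]; omega
        obtain ⟨f', hf⟩ : ∃ f', n.toNat = f' + 1 := ⟨n.toNat - 1, by omega⟩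
        have hstep : pvBRun (n.toNat + 1) n [] =
            pvBRun (f' + 1) (PySem.Int.floordiv n 10) ([] ++ [PySem.Int.mod n 10]) := by
          rw [hf, pvBRun, if_neg hz, if_pos (Or.inr hle)]
        rw [hstep, pvBRun_acc,
            pvBRun_stable N (PySem.Int.floordiv n 10) (by omega) hq0 (f' + 1)
              ((PySem.Int.floordiv n 10).toNat + 1) [] (by omega) (by omega),
            if_neg hz]
        simp
theorem pvAOuter_zero : ∀ (fuel : Nat) (x : Int), pvAOuter 0 (fuel + 1) x = 0 := by
  intro fuel
  induction fuel with
  | zero => intro x; rfl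
  | succ f ih =>
    intro x
    rw [pvAOuter]
    have h1 : pvStrip (0:Int).toNat 0 = 0 := rfl
    rw [h1]
    have h2 : PySem.Int.floordiv 0 10 = 0 := by decide
    have h3 : PySem.Int.mod 0 10 = 0 := by decide
    rw [h2, h3]
    exact ih 0

-- main invariant: A's outer loop with fuel j+1 returns the j-th starter (0 past the end)
theorem pvMain : ∀ (N : Nat) (n : Int), n.toNat ≤ N → 0 ≤ n → ∀ (j : Nat) (x : Int),
    pvAOuter n (j + 1) x = (pvBRun (n.toNat + 1) n []).getD j 0 := by
  intro N
  induction N with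
  | zero =>
    intro n hN h0 j x
    have hn : n = 0 := by omega
    subst hn
    rw [pvAOuter_zero, pvBRun_strip 0 0 (by decide) (by decide)]
    have h1 : pvStrip (0:Int).toNat 0 = 0 := rfl
    have h2 : PySem.Int.floordiv 0 10 = 0 := by decide
    have h3 : PySem.Int.mod 0 10 = 0 := by decide
    rw [h1, h2, h3, if_pos rfl]
    cases j <;> simp
  | succ N ih =>
    intro n hN h0 j x
    have hm := (pvStrip_bounds n.toNat h0).1
    have hml := (pvStrip_bounds n.toNat h0).2
    have hfix := pvStrip_fix n.toNat n h0 le_rfl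
    have hdiv : PySem.Int.floordiv (pvStrip n.toNat n) 10 = (pvStrip n.toNat n) / 10 :=
      PySem.Int.floordiv_eq_ediv_of_pos (by norm_num)
    rw [pvAOuter, pvBRun_strip (N + 1) n hN h0]
    cases j with
    | zero =>
      rw [pvAOuter]
      simp
    | succ j =>
      by_cases hz : PySem.Int.floordiv (pvStrip n.toNat n) 10 = 0
      · rw [hz, if_pos rfl, pvAOuter_zero]
        simp
      · rw [if_neg hz]
        -- the strip result is < 10 or its last digit is a starter, so it is ≥ 10 only with ≤
        have hq0 : 0 ≤ PySem.Int.floordiv (pvStrip n.toNat n) 10 := by rw [hdiv]; omega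
        have h10 : (10:Int) ≤ pvStrip n.toNat n := by rw [hdiv] at hz; omega
        have hrlt : (PySem.Int.floordiv (pvStrip n.toNat n) 10).toNat ≤ N := by
          rw [hdiv]
          omega
        rw [ih _ hrlt hq0 j _]
        simp

-- ===== VERDICT (by name: the statement is the Claim_ definition above) =====
theorem get_k_run_starter_spec : Claim_equal_get_k_run_starter := by
  intro n k _ hpre
  obtain ⟨hn, hk⟩ := hpre
  unfold Spec_get_k_run_starter get_k_run_starter get_k_run_starter_alt
  have hfuel : (k + 1).toNat = k.toNat + 1 := by omega
  rw [hfuel, pvMain n.toNat n le_rfl hn k.toNat 0]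
  simp only [PySem.List.len_eq]
  by_cases hlt : k < ((pvBRun (n.toNat + 1) n []).length : Int)
  · rw [if_pos hlt, PySem.List.pyGetD_eq_getElem _ _ hk hlt,
        List.getD_eq_getElem _ _ (by omega)]
  · rw [if_neg hlt, List.getD_eq_default _ _ (by omega)]
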